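-- pv_equiv track=rewrite | github.com/ful1e5/clickgen | src/builders/win_builder.py | __frames_have_animation
-- ===== SOURCE A (Python) =====
-- from typing import Any, List, Literal, NamedTuple, Optional, Set, Tuple
--
-- def __frames_have_animation(
--     frames: List[Tuple[int, int, int, str, int]]
-- ) -> bool:
--     """ For checking @frames have animation. """
--     sizes: Set[int] = set()
--     for frame in frames:
--         if frame[4] == 0:
--             continue
--         if frame[0] in sizes:
--             return True
--         sizes.add(frame[0])
--
--     return False
-- ===== SOURCE B (Python) =====
-- def __frames_have_animation(frames):
--     sizes = sorted(f[0] for f in frames if f[4] != 0)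
--     return any(a == b for a, b in zip(sizes, sizes[1:]))
-- ===== Notes on version B (the rewrite author's own statement) =====
-- stated objective: alternative
-- what changed: Replaces the hash-set membership scan with early return by sort-then-adjacent-comparison duplicate detection: collect qualifying sizes, sort them, and report whether any two neighbours are equal (no set is used at all).
import Mathlib
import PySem

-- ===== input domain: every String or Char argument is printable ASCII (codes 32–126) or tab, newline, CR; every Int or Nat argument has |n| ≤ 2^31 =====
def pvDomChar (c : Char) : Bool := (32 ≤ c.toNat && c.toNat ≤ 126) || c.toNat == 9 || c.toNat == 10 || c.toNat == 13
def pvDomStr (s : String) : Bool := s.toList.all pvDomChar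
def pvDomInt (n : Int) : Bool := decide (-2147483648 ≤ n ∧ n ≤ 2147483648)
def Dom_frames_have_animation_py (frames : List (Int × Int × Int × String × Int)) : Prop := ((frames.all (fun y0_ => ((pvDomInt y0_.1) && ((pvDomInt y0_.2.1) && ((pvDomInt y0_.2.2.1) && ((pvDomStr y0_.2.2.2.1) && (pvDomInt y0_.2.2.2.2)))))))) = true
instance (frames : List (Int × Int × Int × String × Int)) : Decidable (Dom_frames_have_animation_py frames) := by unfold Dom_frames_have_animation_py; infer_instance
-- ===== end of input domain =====

-- B replaces A's incremental set-membership scan with sort-then-adjacent-comparison duplicate detection (objective: alternative).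

-- ===== PORT A =====
-- the for-loop of A over (frames, sizes): skip frames with delay 0, return True on a seen size, else add it
def pvLoopA : List (Int × Int × Int × String × Int) → PySem.Set Int → Bool
  | [], _ => false
  | f :: rest, sizes =>
      if f.2.2.2.2 == 0 then pvLoopA rest sizes
      else if PySem.Set.contains sizes f.1 then true
      else pvLoopA rest (PySem.Set.add sizes f.1)

def frames_have_animation_py (frames : List (Int × Int × Int × String × Int)) : Bool :=
  pvLoopA frames PySem.Set.empty

-- ===== PORT B =====
def frames_have_animation_py_alt (frames : List (Int × Int × Int × String × Int)) : Bool :=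
  let sizes := PySem.List.sorted ((frames.filter (fun f => f.2.2.2.2 != 0)).map (fun f => f.1)) (fun x => x) false
  (sizes.zip sizes.tail).any (fun p => p.1 == p.2)

-- ===== PRECONDITION & SPEC =====
def Spec_frames_have_animation_py (frames : List (Int × Int × Int × String × Int)) (out : Bool) : Prop := out = frames_have_animation_py_alt frames
instance (frames : List (Int × Int × Int × String × Int)) (out : Bool) : Decidable (Spec_frames_have_animation_py frames out) := by unfold Spec_frames_have_animation_py; infer_instance

-- ===== CLAIM (what is proved, stated in full; the proofs are below) =====
def Claim_equal_frames_have_animation_py : Prop := ∀ (frames : List (Int × Int × Int × String × Int)), Dom_frames_have_animation_py frames → Spec_frames_have_animation_py frames (frames_have_animation_py frames)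

-- ===== LEMMAS AND PROOFS =====

-- A's loop returns true iff the filtered sizes already seen (s) extended by the rest are not duplicate-free
theorem pvLoopA_eq (xs : List (Int × Int × Int × String × Int)) (s : PySem.Set Int) (hs : s.Nodup) :
    pvLoopA xs s = !decide ((s ++ (xs.filter (fun f => f.2.2.2.2 != 0)).map (fun f => f.1)).Nodup) := by
  induction xs generalizing s with
  | nil => simp [pvLoopA, hs]
  | cons f rest ih =>
      simp only [pvLoopA]
      by_cases h0 : f.2.2.2.2 = 0
      · simp [h0, ih s hs]
      · simp only [beq_iff_eq, h0, if_false]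
        by_cases hmem : f.1 ∈ s
        · have hct : PySem.Set.contains s f.1 = true := by simpa using hmem
          rw [hct]
          simp only [if_true]
          have : ¬ (s ++ ((f :: rest).filter (fun f => f.2.2.2.2 != 0)).map (fun f => f.1)).Nodup := by
            intro h
            rw [List.filter_cons_of_pos (by simpa using h0)] at h
            simp only [List.map_cons] at h
            have hm := List.nodup_middle.mp h
            rw [List.nodup_cons] at hm
            exact hm.1 (List.mem_append_left _ hmem)
          simp [this]
        · have hc : PySem.Set.contains s f.1 = false := by simpa using hmem
          rw [hc]
          simp only [Bool.false_eq_true, if_false]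
          rw [PySem.Set.add_of_not_mem hmem] at *
          have hs' : (s ++ [f.1]).Nodup := by
            refine List.nodup_append.mpr ⟨hs, List.nodup_singleton _, ?_⟩
            intro a ha b hb; simp only [List.mem_singleton] at hb
            subst hb; exact fun he => hmem (he ▸ ha)
          rw [ih (s ++ [f.1]) hs']
          rw [List.filter_cons_of_pos (by simpa using h0)]
          simp

-- on a ≤-sorted list, some adjacent pair is equal iff the list has a duplicate
theorem pvAdjEq_of_sorted (ys : List Int) (hp : ys.Pairwise (· ≤ ·)) :
    ((ys.zip ys.tail).any (fun p => p.1 == p.2)) = !decide ys.Nodup := by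
  induction ys with
  | nil => simp
  | cons a t ih =>
      cases t with
      | nil => simp
      | cons b u =>
          rw [List.pairwise_cons] at hp
          obtain ⟨hab, hpt⟩ := hp
          have hih := ih hpt
          simp only [List.tail_cons, List.zip_cons_cons, List.any_cons] at hih ⊢
          by_cases heq : a = b
          · subst heq
            have hnd : ¬ (a :: a :: u).Nodup := by
              intro h; rw [List.nodup_cons] at h; exact h.1 (List.mem_cons_self)
            simp [hnd]
          · have halt : a < b := lt_of_le_of_ne (hab b List.mem_cons_self) heq
            have hnm : a ∉ b :: u := by
              intro hm
              rcases List.mem_cons.mp hm with h | h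
              · exact heq h
              · have : b ≤ a := (List.pairwise_cons.mp hpt).1 a h
                omega
            have hbeq : (a == b) = false := by simpa using heq
            rw [hbeq, Bool.false_or, hih]
            have hiff : (a :: b :: u).Nodup ↔ (b :: u).Nodup := by
              rw [List.nodup_cons]; exact ⟨fun h => h.2, fun h => ⟨hnm, h⟩⟩
            simp [hiff]

-- ===== VERDICT (by name: the statement is the Claim_ definition above) =====
theorem frames_have_animation_py_spec : Claim_equal_frames_have_animation_py := by
  intro frames _
  unfold Spec_frames_have_animation_py frames_have_animation_py frames_have_animation_py_alt
  rw [pvLoopA_eq frames PySem.Set.empty (by simp [PySem.Set.empty])]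
  set raw := (frames.filter (fun f => f.2.2.2.2 != 0)).map (fun f => f.1) with hraw
  set sizes := PySem.List.sorted raw (fun x => x) false with hsz
  have hperm : sizes.Perm raw := PySem.List.sorted_perm raw (fun x => x) false
  have hp : sizes.Pairwise (· ≤ ·) := by
    have := PySem.List.sorted_pairwise raw (fun x => x)
    simpa [hsz] using this
  rw [pvAdjEq_of_sorted sizes hp]
  simp only [PySem.Set.empty, List.nil_append]
  have hiff : sizes.Nodup ↔ raw.Nodup := hperm.nodup_iff
  simp [hiff]
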